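-- pv_equiv track=rewrite | github.com/hhhrrrttt222111/CodeChef | MORE CODING PLATFORMS/Codeforces/Paint The Array/paintTheArray.py | checkArrayTwo
-- ===== SOURCE A (Python) =====
-- def gcd(a, b):
--     if a == 0:
--         return b
--     return gcd(b%a, a)
--
-- def containMult(g, a):
--     dup = False
--     for i in a:
--         if i % g == 0:
--             dup = True
--             break
--     if dup:
--         return 0
--     else:
--         return g
--
-- def checkArrayTwo(g, b, a):
--     g = b[0]
--     for i in b[1:]:
--         g = gcd(g, i)
--     if g == 1:
--         return 0
--     else:
--         return containMult(g, a)
-- ===== SOURCE B (Python) =====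
-- def checkArrayTwo(g, b, a):
--     g = b[0]
--     for i in b[1:]:
--         # iterative Euclid: gcd(g, i) with A's argument convention
--         x, y = g, i
--         while x:
--             x, y = y % x, x
--         g = y
--     if g != 1 and not any(i % g == 0 for i in a):
--         return g
--     return 0
-- ===== Notes on version B (the rewrite author's own statement) =====
-- stated objective: idiomatic
-- what changed: Replaces the recursive Euclidean gcd helper with an inline iterative while-loop and collapses the flag-and-break divisibility scan plus the g==1 branch into one short-circuiting any() expression.
import Mathlib
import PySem

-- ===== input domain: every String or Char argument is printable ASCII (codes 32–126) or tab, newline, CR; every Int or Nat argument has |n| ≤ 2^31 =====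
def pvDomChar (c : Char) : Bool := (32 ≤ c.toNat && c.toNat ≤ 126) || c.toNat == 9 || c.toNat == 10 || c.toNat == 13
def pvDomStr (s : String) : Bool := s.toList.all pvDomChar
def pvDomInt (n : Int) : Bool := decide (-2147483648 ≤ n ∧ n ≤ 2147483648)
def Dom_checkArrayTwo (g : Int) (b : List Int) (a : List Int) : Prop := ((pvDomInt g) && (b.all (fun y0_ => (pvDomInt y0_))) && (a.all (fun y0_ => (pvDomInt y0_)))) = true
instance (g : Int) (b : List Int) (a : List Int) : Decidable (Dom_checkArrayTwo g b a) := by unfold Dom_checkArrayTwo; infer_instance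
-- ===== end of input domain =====

-- B inlines an iterative Euclid loop and replaces the flag-and-break scan with a short-circuiting any(); return value only, no side effects.

-- termination measure for Euclid's algorithm (cited by both ports' decreasing_by)
theorem pvModNatAbsLt (b a : Int) (h : a ≠ 0) : (PySem.Int.mod b a).natAbs < a.natAbs := by
  rcases lt_trichotomy a 0 with h1 | h1 | h1
  · have h2 := PySem.Int.mod_neg_bounds (a := b) (b := a) h1
    omega
  · exact absurd h1 h
  · have h2 := PySem.Int.mod_nonneg (a := b) (b := a) h1
    have h3 := PySem.Int.mod_lt (a := b) (b := a) h1
    omega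

-- ===== PORT A =====
-- def gcd(a, b): if a == 0: return b; return gcd(b%a, a)
def pyGcd (a b : Int) : Int :=
  if h : a = 0 then b else pyGcd (PySem.Int.mod b a) a
termination_by a.natAbs
decreasing_by exact pvModNatAbsLt b a h

-- containMult(g, a): flag-and-break loop, rendered as structural recursion with early 0
def containMult (g : Int) : List Int → Int
  | [] => g
  | i :: rest => if PySem.Int.mod i g = 0 then 0 else containMult g rest

def checkArrayTwo (g : Int) (b : List Int) (a : List Int) : Int :=
  match b with
  | [] => 0   -- unreachable under Pre_ (b[0] raises IndexError in Python)
  | g0 :: rest =>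
    let gf := rest.foldl (fun acc i => pyGcd acc i) g0
    if gf = 1 then 0 else containMult gf a

-- ===== PORT B =====
-- while x: x, y = y % x, x; return y   (iterative Euclid; tail recursion on the loop state)
def gcdLoop (x y : Int) : Int :=
  if h : x = 0 then y else gcdLoop (PySem.Int.mod y x) x
termination_by x.natAbs
decreasing_by exact pvModNatAbsLt y x h

def checkArrayTwo_alt (g : Int) (b : List Int) (a : List Int) : Int :=
  match b with
  | [] => 0   -- unreachable under Pre_
  | g0 :: rest =>
    let gf := rest.foldl (fun acc i => gcdLoop acc i) g0
    if gf ≠ 1 ∧ a.any (fun i => PySem.Int.mod i gf == 0) = false then gf else 0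

-- ===== PRECONDITION & SPEC =====
-- Pre_ excludes exactly the inputs where Python A raises: empty b (IndexError on b[0]) and
-- all-zero b with non-empty a (the fold yields g = 0 and 'i % 0' raises ZeroDivisionError).
def Pre_checkArrayTwo (g : Int) (b : List Int) (a : List Int) : Prop :=
  b ≠ [] ∧ (a = [] ∨ ∃ x ∈ b, x ≠ 0)
instance (g : Int) (b : List Int) (a : List Int) : Decidable (Pre_checkArrayTwo g b a) := by unfold Pre_checkArrayTwo; infer_instance
def pvWitness_checkArrayTwo : Int × List Int × List Int := (0, [4, 6], [5])

def Spec_checkArrayTwo (g : Int) (b : List Int) (a : List Int) (out : Int) : Prop := out = checkArrayTwo_alt g b a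
instance (g : Int) (b : List Int) (a : List Int) (out : Int) : Decidable (Spec_checkArrayTwo g b a out) := by unfold Spec_checkArrayTwo; infer_instance

-- ===== CLAIM (what is proved, stated in full; the proofs are below) =====
def Claim_equal_checkArrayTwo : Prop := ∀ (g : Int) (b : List Int) (a : List Int), Dom_checkArrayTwo g b a → Pre_checkArrayTwo g b a → Spec_checkArrayTwo g b a (checkArrayTwo g b a)

-- ===== LEMMAS AND PROOFS =====
theorem gcdLoop_eq_pyGcd (a b : Int) : gcdLoop a b = pyGcd a b := by
  unfold gcdLoop pyGcd
  split
  · rfl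
  · exact gcdLoop_eq_pyGcd _ _
termination_by a.natAbs
decreasing_by exact pvModNatAbsLt b a (by assumption)

theorem foldl_gcd_eq (l : List Int) (g : Int) :
    l.foldl (fun acc i => gcdLoop acc i) g = l.foldl (fun acc i => pyGcd acc i) g := by
  induction l generalizing g with
  | nil => rfl
  | cons x xs ih => simp [List.foldl, gcdLoop_eq_pyGcd, ih]

theorem containMult_eq_any (g : Int) (a : List Int) :
    containMult g a = if a.any (fun i => PySem.Int.mod i g == 0) = false then g else 0 := by
  induction a with
  | nil => rfl
  | cons i rest ih =>
    by_cases h : PySem.Int.mod i g = 0 <;> simp [containMult, h, ih]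

-- ===== VERDICT (by name: the statement is the Claim_ definition above) =====
theorem checkArrayTwo_spec : Claim_equal_checkArrayTwo := by
  intro g b a _ _
  unfold Spec_checkArrayTwo checkArrayTwo checkArrayTwo_alt
  cases b with
  | nil => rfl
  | cons g0 rest =>
    simp only [foldl_gcd_eq]
    set gf := rest.foldl (fun acc i => pyGcd acc i) g0 with hgf
    by_cases h1 : gf = 1
    · simp [h1]
    · rw [containMult_eq_any]
      by_cases h2 : (a.any (fun i => PySem.Int.mod i gf == 0)) = false <;> simp [h1, h2]
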